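-- pv_equiv track=rewrite | github.com/melanie-t/twitter-language-detection | src/NaivesBayesClassification.py | build_vocab0
-- ===== SOURCE A (Python) =====
-- def build_vocab0(n):
--     vocabulary = dict()
--     a = 97
--     if n == 1:
--         for i in range(0, 26):
--             vocabulary[chr(a+i)] = 0
--     elif n == 2:
--         for i in range(0, 26):
--             for j in range(0, 26):
--                 vocabulary[chr(a+i)+chr(a+j)] = 0
--                 # vocabulary[chr(a+i)+"|"+chr(a+j)] = 0
--     elif n == 3:
--         for i in range(0, 26):
--             for j in range(0, 26):
--                 for k in range(0, 26):
--                     vocabulary[chr(a+i)+chr(a+j)+chr(a+k)] = 0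
--     return vocabulary
-- ===== SOURCE B (Python) =====
-- # B: replaces A's three hardcoded nesting-depth branches by one parametric pass that
-- # grows all n-letter combinations by iterated Cartesian extension (idiomatic; not faster).
-- def build_vocab0(n):
--     if n not in (1, 2, 3):
--         return {}
--     combos = ['']
--     for _ in range(n):
--         combos = [s + chr(c) for s in combos for c in range(97, 123)]
--     return {s: 0 for s in combos}
-- ===== Notes on version B (the rewrite author's own statement) =====
-- stated objective: idiomatic
-- what changed: A's three hardcoded branches of increasingly nested loops are collapsed into a single parametric pass that grows the set of n-letter combinations by iterated Cartesian extension of a singleton list, then zips each combination with zero.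
import Mathlib
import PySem

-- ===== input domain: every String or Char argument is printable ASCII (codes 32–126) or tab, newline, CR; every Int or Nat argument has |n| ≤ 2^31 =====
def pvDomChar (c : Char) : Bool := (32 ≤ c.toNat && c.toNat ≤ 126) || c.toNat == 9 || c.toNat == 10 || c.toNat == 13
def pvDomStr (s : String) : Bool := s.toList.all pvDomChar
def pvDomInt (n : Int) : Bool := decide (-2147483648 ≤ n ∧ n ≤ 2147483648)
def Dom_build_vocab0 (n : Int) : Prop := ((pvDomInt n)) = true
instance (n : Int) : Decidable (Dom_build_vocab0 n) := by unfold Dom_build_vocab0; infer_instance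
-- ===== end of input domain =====

-- B collapses A's three hardcoded nesting-depth branches into one parametric pass (idiomatic); equal output proved for every n.

-- chr(m) ported by hand (PySem has no chr): exact for 0 ≤ m < 0x110000; both programs only call it on 97..122.
def pyChr (m : Int) : String := String.ofList [Char.ofNat m.toNat]

-- ===== PORT A =====
def build_vocab0 (n : Int) : List (String × Int) :=
  let vocabulary : PySem.Dict String Int := PySem.Dict.empty
  let a : Int := 97
  let vocabulary :=
    if n = 1 then
      (PySem.List.pyRange 0 26 1).foldl (fun d i => d.insert (pyChr (a + i)) 0) vocabulary
    else if n = 2 then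
      (PySem.List.pyRange 0 26 1).foldl (fun d i =>
        (PySem.List.pyRange 0 26 1).foldl (fun d j =>
          d.insert (pyChr (a + i) ++ pyChr (a + j)) 0) d) vocabulary
    else if n = 3 then
      (PySem.List.pyRange 0 26 1).foldl (fun d i =>
        (PySem.List.pyRange 0 26 1).foldl (fun d j =>
          (PySem.List.pyRange 0 26 1).foldl (fun d k =>
            d.insert (pyChr (a + i) ++ pyChr (a + j) ++ pyChr (a + k)) 0) d) d) vocabulary
    else vocabulary
  vocabulary.items

-- ===== PORT B =====
def build_vocab0_alt (n : Int) : List (String × Int) :=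
  if ¬(n = 1 ∨ n = 2 ∨ n = 3) then []
  else
    let combos := (List.range n.toNat).foldl
      (fun cs _ => cs.flatMap (fun s => (PySem.List.pyRange 97 123 1).map (fun c => s ++ pyChr c))) [""]
    combos.map (fun s => (s, 0))

-- ===== PRECONDITION & SPEC =====
def Spec_build_vocab0 (n : Int) (out : List (String × Int)) : Prop := out = build_vocab0_alt n
instance (n : Int) (out : List (String × Int)) : Decidable (Spec_build_vocab0 n out) := by unfold Spec_build_vocab0; infer_instance

-- ===== CLAIM (what is proved, stated in full; the proofs are below) =====
def Claim_equal_build_vocab0 : Prop := ∀ (n : Int), Dom_build_vocab0 n → Spec_build_vocab0 n (build_vocab0 n)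

-- ===== LEMMAS AND PROOFS =====

def pvK (i : Int) : Char := Char.ofNat (97 + i).toNat
def pvL : List Int := PySem.List.pyRange 0 26 1
def pvC2 : List (String × Int) :=
  pvL.flatMap (fun i => pvL.map (fun j => (String.ofList [pvK i, pvK j], 0)))
def pvC3 : List (String × Int) :=
  pvL.flatMap (fun i => pvL.flatMap (fun j =>
    pvL.map (fun k => (String.ofList [pvK i, pvK j, pvK k], 0))))

theorem pyChr97 (i : Int) : pyChr (97 + i) = String.ofList [pvK i] := rfl

theorem pvR_eq : PySem.List.pyRange 97 123 1 = pvL.map (fun i => 97 + i) := by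
  rw [PySem.List.pyRange_one, pvL, PySem.List.pyRange_one, List.map_map]
  exact List.map_congr_left (fun k _ => by simp only [Function.comp_apply]; omega)

theorem pvProd_eq {α β : Type} (l₁ : List α) (l₂ : List β) :
    l₁ ×ˢ l₂ = l₁.flatMap (fun a => l₂.map (Prod.mk a)) := rfl

theorem pvNodup_L : pvL.Nodup := PySem.List.nodup_pyRange_one 0 26
theorem pvMem_L {i : Int} (h : i ∈ pvL) : 0 ≤ i ∧ i < 26 := PySem.List.mem_pyRange_one.mp h

theorem pvOfList_inj {l1 l2 : List Char} (h : String.ofList l1 = String.ofList l2) : l1 = l2 := by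
  have := congrArg String.toList h; simpa using this

theorem pvChr_nat_inj {m k : Nat} (hm : m < 55296) (hk : k < 55296)
    (h : Char.ofNat m = Char.ofNat k) : m = k := by
  have := congrArg Char.toNat h
  rw [Char.toNat_ofNat, Char.toNat_ofNat, if_pos (Or.inl hm), if_pos (Or.inl hk)] at this
  exact this

theorem pvChr_inj {i j : Int} (h0 : 0 ≤ i) (h0' : 0 ≤ j) (hi : i < 26) (hj : j < 26)
    (h : pvK i = pvK j) : i = j := by
  have := pvChr_nat_inj (m := (97+i).toNat) (k := (97+j).toNat) (by omega) (by omega) h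
  omega

-- ---------- n = 2 ----------

theorem map2_eq : (pvL ×ˢ pvL).map (fun p => (pyChr (97 + p.1) ++ pyChr (97 + p.2), (0:Int))) = pvC2 := by
  rw [pvProd_eq, List.map_flatMap, pvC2]
  refine List.flatMap_congr ?_
  intro i _
  rw [List.map_map]
  refine List.map_congr_left ?_
  intro j _
  simp only [Function.comp_apply, pyChr97, ← String.ofList_append, List.cons_append, List.nil_append]

theorem pvNodup2 : ((pvL ×ˢ pvL).map (fun p => pyChr (97 + p.1) ++ pyChr (97 + p.2))).Nodup := by
  refine List.Nodup.map_on ?_ (List.Nodup.product pvNodup_L pvNodup_L)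
  rintro ⟨i, j⟩ hp ⟨i', j'⟩ hq h
  obtain ⟨hi0, hi26⟩ := pvMem_L (List.pair_mem_product.mp hp).1
  obtain ⟨hj0, hj26⟩ := pvMem_L (List.pair_mem_product.mp hp).2
  obtain ⟨hi0', hi26'⟩ := pvMem_L (List.pair_mem_product.mp hq).1
  obtain ⟨hj0', hj26'⟩ := pvMem_L (List.pair_mem_product.mp hq).2
  simp only [pyChr97, ← String.ofList_append, List.cons_append, List.nil_append] at h
  have h' := pvOfList_inj h
  injection h' with e1 h''
  injection h'' with e2 _
  exact Prod.ext (pvChr_inj hi0 hi0' hi26 hi26' e1) (pvChr_inj hj0 hj0' hj26 hj26' e2)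

theorem pvA2 (n : Int) (h1 : ¬n = 1) (h2 : n = 2) : build_vocab0 n = pvC2 := by
  simp only [build_vocab0]
  rw [if_neg h1, if_pos h2, show PySem.List.pyRange 0 26 1 = pvL from rfl]
  have hstep : (fun (d : PySem.Dict String Int) (i : Int) =>
        (pvL.map (Prod.mk i)).foldl (fun d p => d.insert (pyChr (97 + p.1) ++ pyChr (97 + p.2)) (0:Int)) d)
      = (fun d i => pvL.foldl (fun d j => d.insert (pyChr (97 + i) ++ pyChr (97 + j)) (0:Int)) d) := by
    funext d i
    rw [List.foldl_map]
  rw [show (pvL.foldl (fun d i => pvL.foldl (fun d j =>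
        d.insert (pyChr (97 + i) ++ pyChr (97 + j)) (0:Int)) d) PySem.Dict.empty)
      = ((pvL ×ˢ pvL).foldl (fun d p =>
        d.insert (pyChr (97 + p.1) ++ pyChr (97 + p.2)) (0:Int)) PySem.Dict.empty) from by
      rw [pvProd_eq, List.foldl_flatMap, hstep],
    PySem.Dict.items_foldl_insert_fresh (pvL ×ˢ pvL)
      (fun p => pyChr (97 + p.1) ++ pyChr (97 + p.2)) (fun _ => (0:Int)) PySem.Dict.empty
      (by intro a _; simp) pvNodup2,
    show (PySem.Dict.empty : PySem.Dict String Int).items = [] from rfl, List.nil_append]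
  exact map2_eq

theorem pvB2 : build_vocab0_alt 2 = pvC2 := by
  simp only [build_vocab0_alt]
  rw [if_neg (by decide)]
  rw [show List.range (2:Int).toNat = [0, 1] from rfl]
  simp only [List.foldl_cons, List.foldl_nil, List.flatMap_cons, List.flatMap_nil,
    List.append_nil, List.map_flatMap, pvR_eq, List.map_map, List.flatMap_map]
  rw [pvC2]
  refine List.flatMap_congr ?_
  intro i _
  simp only [Function.comp_apply]
  refine List.map_congr_left ?_
  intro j _
  simp only [Function.comp_apply, pyChr97, String.empty_append, ← String.ofList_append,
    List.cons_append, List.nil_append]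

-- ---------- n = 3 ----------

theorem map3_eq : (pvL ×ˢ (pvL ×ˢ pvL)).map
    (fun p => (pyChr (97 + p.1) ++ pyChr (97 + p.2.1) ++ pyChr (97 + p.2.2), (0:Int))) = pvC3 := by
  rw [pvProd_eq, List.map_flatMap, pvC3]
  refine List.flatMap_congr ?_
  intro i _
  rw [pvProd_eq, List.map_flatMap, List.map_flatMap]
  refine List.flatMap_congr ?_
  intro j _
  rw [List.map_map, List.map_map]
  refine List.map_congr_left ?_
  intro k _
  simp only [Function.comp_apply, pyChr97, ← String.ofList_append, List.cons_append, List.nil_append]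

theorem pvNodup3 : ((pvL ×ˢ (pvL ×ˢ pvL)).map
    (fun p => pyChr (97 + p.1) ++ pyChr (97 + p.2.1) ++ pyChr (97 + p.2.2))).Nodup := by
  refine List.Nodup.map_on ?_ (List.Nodup.product pvNodup_L (List.Nodup.product pvNodup_L pvNodup_L))
  rintro ⟨i, j, k⟩ hp ⟨i', j', k'⟩ hq h
  obtain ⟨hi0, hi26⟩ := pvMem_L (List.pair_mem_product.mp hp).1
  obtain ⟨hj0, hj26⟩ := pvMem_L (List.pair_mem_product.mp (List.pair_mem_product.mp hp).2).1
  obtain ⟨hk0, hk26⟩ := pvMem_L (List.pair_mem_product.mp (List.pair_mem_product.mp hp).2).2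
  obtain ⟨hi0', hi26'⟩ := pvMem_L (List.pair_mem_product.mp hq).1
  obtain ⟨hj0', hj26'⟩ := pvMem_L (List.pair_mem_product.mp (List.pair_mem_product.mp hq).2).1
  obtain ⟨hk0', hk26'⟩ := pvMem_L (List.pair_mem_product.mp (List.pair_mem_product.mp hq).2).2
  simp only [pyChr97, ← String.ofList_append, List.cons_append, List.nil_append] at h
  have h' := pvOfList_inj h
  injection h' with e1 h''
  injection h'' with e2 h'''
  injection h''' with e3 _
  exact Prod.ext (pvChr_inj hi0 hi0' hi26 hi26' e1)
    (Prod.ext (pvChr_inj hj0 hj0' hj26 hj26' e2) (pvChr_inj hk0 hk0' hk26 hk26' e3))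

theorem pvA3 (n : Int) (h1 : ¬n = 1) (h2 : ¬n = 2) (h3 : n = 3) : build_vocab0 n = pvC3 := by
  simp only [build_vocab0]
  rw [if_neg h1, if_neg h2, if_pos h3, show PySem.List.pyRange 0 26 1 = pvL from rfl]
  have hstep2 : ∀ (i : Int), (fun (d : PySem.Dict String Int) (j : Int) =>
        (pvL.map (Prod.mk j)).foldl (fun d q =>
          d.insert (pyChr (97 + i) ++ pyChr (97 + q.1) ++ pyChr (97 + q.2)) (0:Int)) d)
      = (fun d j => pvL.foldl (fun d k =>
          d.insert (pyChr (97 + i) ++ pyChr (97 + j) ++ pyChr (97 + k)) (0:Int)) d) := by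
    intro i
    funext d j
    rw [List.foldl_map]
  have hstep : (fun (d : PySem.Dict String Int) (i : Int) =>
        ((pvL ×ˢ pvL).map (Prod.mk i)).foldl (fun d p =>
          d.insert (pyChr (97 + p.1) ++ pyChr (97 + p.2.1) ++ pyChr (97 + p.2.2)) (0:Int)) d)
      = (fun d i => pvL.foldl (fun d j => pvL.foldl (fun d k =>
          d.insert (pyChr (97 + i) ++ pyChr (97 + j) ++ pyChr (97 + k)) (0:Int)) d) d) := by
    funext d i
    rw [List.foldl_map, pvProd_eq, List.foldl_flatMap]
    rw [hstep2 i]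
  rw [show (pvL.foldl (fun d i => pvL.foldl (fun d j => pvL.foldl (fun d k =>
        d.insert (pyChr (97 + i) ++ pyChr (97 + j) ++ pyChr (97 + k)) (0:Int)) d) d) PySem.Dict.empty)
      = ((pvL ×ˢ (pvL ×ˢ pvL)).foldl (fun d p =>
        d.insert (pyChr (97 + p.1) ++ pyChr (97 + p.2.1) ++ pyChr (97 + p.2.2)) (0:Int)) PySem.Dict.empty) from by
      rw [pvProd_eq (l₂ := pvL ×ˢ pvL), List.foldl_flatMap, hstep],
    PySem.Dict.items_foldl_insert_fresh (pvL ×ˢ (pvL ×ˢ pvL))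
      (fun p => pyChr (97 + p.1) ++ pyChr (97 + p.2.1) ++ pyChr (97 + p.2.2)) (fun _ => (0:Int))
      PySem.Dict.empty (by intro a _; simp) pvNodup3,
    show (PySem.Dict.empty : PySem.Dict String Int).items = [] from rfl, List.nil_append]
  exact map3_eq

theorem pvB3 : build_vocab0_alt 3 = pvC3 := by
  simp only [build_vocab0_alt]
  rw [if_neg (by decide)]
  rw [show List.range (3:Int).toNat = [0, 1, 2] from rfl]
  simp only [List.foldl_cons, List.foldl_nil, List.flatMap_cons, List.flatMap_nil,
    List.append_nil, List.map_flatMap, pvR_eq, List.map_map, List.flatMap_map,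
    List.flatMap_assoc]
  rw [pvC3]
  refine List.flatMap_congr ?_
  intro i _
  refine List.flatMap_congr ?_
  intro j _
  refine List.map_congr_left ?_
  intro k _
  simp only [Function.comp_apply, pyChr97, String.empty_append, ← String.ofList_append,
    List.cons_append, List.nil_append]

-- ===== VERDICT (by name: the statement is the Claim_ definition above) =====
theorem build_vocab0_spec : Claim_equal_build_vocab0 := by
  intro n _
  unfold Spec_build_vocab0
  by_cases h1 : n = 1
  · subst h1; decide
  · by_cases h2 : n = 2
    · subst h2; rw [pvA2 2 h1 rfl, pvB2]
    · by_cases h3 : n = 3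
      · subst h3; rw [pvA3 3 h1 h2 rfl, pvB3]
      · simp [build_vocab0, build_vocab0_alt, h1, h2, h3]
        rfl
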